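-- pv_equiv track=rewrite | github.com/XOM91K/EGE | Isa_Ege_2026/25/8.py | dels
-- ===== SOURCE A (Python) =====
-- def dels(d):
--     dell=[]
--     for x in range(2, int(d**0.5)+1):
--         if d%x==0:
--             if str(x)[-1] == '9' and x != 9:
--                 dell.append(x)
--             if str(d // x)[-1] == '9' and (d // x) != 9:
--                 dell.append(d // x)
--     return sorted(set(dell))
-- ===== SOURCE B (Python) =====
-- def dels(d):
--     return [x for x in range(19, d // 2 + 1, 10) if d % x == 0]
-- ===== Notes on version B (the rewrite author's own statement) =====
-- stated objective: idiomatic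
-- what changed: Instead of trial division up to the square root of d with string inspection of both members of each factor pair, B directly tests the only possible answers - the candidates congruent to nine modulo ten, from nineteen up to half of d - for divisibility, yielding an already-sorted distinct list with no set/str/sorted.
import Mathlib
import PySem

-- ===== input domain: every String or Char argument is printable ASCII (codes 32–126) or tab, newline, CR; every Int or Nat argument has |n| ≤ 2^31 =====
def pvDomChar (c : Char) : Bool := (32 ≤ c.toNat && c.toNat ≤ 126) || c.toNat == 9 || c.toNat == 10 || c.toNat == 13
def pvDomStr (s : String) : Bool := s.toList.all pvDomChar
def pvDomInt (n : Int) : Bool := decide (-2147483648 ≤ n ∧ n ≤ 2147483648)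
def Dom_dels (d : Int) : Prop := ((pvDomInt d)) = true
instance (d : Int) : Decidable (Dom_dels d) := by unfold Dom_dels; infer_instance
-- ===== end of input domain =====

-- B enumerates the candidates congruent to nine modulo ten up to half of d and keeps the divisors of d,
-- instead of A's trial division up to the square root with string inspection of both factors (idiomatic, not faster).

-- ===== PORT A =====
-- int(d**0.5) is ported as Int.sqrt d: exact on Dom_dels for d ≥ 0 (float pow cannot cross an
-- integer boundary on the domain); for negative d Python raises TypeError — excluded by Pre_dels.
def dels (d : Int) : List Int :=
  let dell : List Int :=
    (PySem.List.pyRange 2 (Int.sqrt d + 1) 1).foldl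
      (fun dell x =>
        if PySem.Int.mod d x == 0 then
          let dell :=
            if (PySem.Str.pyGet? (PySem.Int.toStr x) (-1) == some '9') && !(x == 9) then
              dell ++ [x]
            else dell
          let dell :=
            if (PySem.Str.pyGet? (PySem.Int.toStr (PySem.Int.floordiv d x)) (-1) == some '9')
                && !(PySem.Int.floordiv d x == 9) then
              dell ++ [PySem.Int.floordiv d x]
            else dell
          dell
        else dell)
      []
  PySem.List.sorted (PySem.Set.ofList dell) (fun x => x)

-- ===== PORT B =====
def dels_alt (d : Int) : List Int :=
  (PySem.List.pyRange 19 (PySem.Int.floordiv d 2 + 1) 10).filter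
    (fun x => PySem.Int.mod d x == 0)

-- ===== PRECONDITION & SPEC =====
-- Pre_ excludes negative d, on which Python A raises TypeError (d**0.5 is a complex number).
def Pre_dels (d : Int) : Prop := 0 ≤ d
instance (d : Int) : Decidable (Pre_dels d) := by unfold Pre_dels; infer_instance
def pvWitness_dels : Int := (38)

def Spec_dels (d : Int) (out : List Int) : Prop := out = dels_alt d
instance (d : Int) (out : List Int) : Decidable (Spec_dels d out) := by unfold Spec_dels; infer_instance

-- ===== CLAIM (what is proved, stated in full; the proofs are below) =====
def Claim_equal_dels : Prop := ∀ (d : Int), Dom_dels d → Pre_dels d → Spec_dels d (dels d)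

-- ===== LEMMAS AND PROOFS =====

-- the per-x contribution of A's loop body
def aContrib (d x : Int) : List Int :=
  if PySem.Int.mod d x == 0 then
    (if (PySem.Str.pyGet? (PySem.Int.toStr x) (-1) == some '9') && !(x == 9) then [x] else [])
      ++ (if (PySem.Str.pyGet? (PySem.Int.toStr (PySem.Int.floordiv d x)) (-1) == some '9')
            && !(PySem.Int.floordiv d x == 9) then [PySem.Int.floordiv d x] else [])
  else []

theorem dels_foldl_eq (d : Int) (l : List Int) (acc : List Int) :
    l.foldl
      (fun dell x =>
        if PySem.Int.mod d x == 0 then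
          let dell :=
            if (PySem.Str.pyGet? (PySem.Int.toStr x) (-1) == some '9') && !(x == 9) then
              dell ++ [x]
            else dell
          let dell :=
            if (PySem.Str.pyGet? (PySem.Int.toStr (PySem.Int.floordiv d x)) (-1) == some '9')
                && !(PySem.Int.floordiv d x == 9) then
              dell ++ [PySem.Int.floordiv d x]
            else dell
          dell
        else dell)
      acc = acc ++ l.flatMap (aContrib d) := by
  induction l generalizing acc with
  | nil => simp
  | cons x l ih =>
    simp only [List.foldl_cons, List.flatMap_cons, ih, aContrib]
    split_ifs <;> simp

theorem digitChar_eq_nine (r : Nat) (h : r < 10) : Nat.digitChar r = '9' ↔ r = 9 := by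
  interval_cases r <;> simp [Nat.digitChar]

theorem toDigits_getLast? (n : Nat) :
    (Nat.toDigits 10 n).getLast? = some ((n % 10).digitChar) := by
  rw [Nat.toDigits_eq_if (by norm_num)]
  split_ifs with h
  · rw [Nat.mod_eq_of_lt h]; rfl
  · rw [List.getLast?_concat]

-- str(m)[-1] == '9' tested on a nonnegative integer is m % 10 = 9
theorem lastDigit9 (m : Int) (h : 0 ≤ m) :
    (PySem.Str.pyGet? (PySem.Int.toStr m) (-1) = some '9') ↔ m % 10 = 9 := by
  rw [PySem.Str.pyGet?_eq, PySem.Int.toList_toStr]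
  show PySem.List.pyGet? (PySem.Int.toChars m) (-1) = some '9' ↔ _
  rw [PySem.List.pyGet?_neg_one]
  simp only [PySem.Int.toChars, if_neg (not_lt.mpr h)]
  rw [toDigits_getLast?, Option.some_inj,
    digitChar_eq_nine _ (Nat.mod_lt _ (by norm_num))]
  omega

-- the Bool condition of A's two appends, for a nonnegative candidate
theorem cond9_iff (m : Int) (h : 0 ≤ m) :
    (((PySem.Str.pyGet? (PySem.Int.toStr m) (-1) == some '9') && !(m == 9)) = true) ↔
      (m % 10 = 9 ∧ m ≠ 9) := by
  rw [Bool.and_eq_true, beq_iff_eq, Bool.not_eq_eq_eq_not, Bool.not_true, beq_eq_false_iff_ne,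
    lastDigit9 m h]

theorem mem_aContrib (d x m : Int) (hd : 0 ≤ d) (hx : 2 ≤ x) :
    m ∈ aContrib d x ↔ x ∣ d ∧ (m = x ∨ m = d / x) ∧ m % 10 = 9 ∧ m ≠ 9 := by
  unfold aContrib
  rw [PySem.Int.floordiv_eq_ediv_of_pos (by omega)]
  by_cases hdvd : x ∣ d
  · rw [if_pos (by simpa [PySem.Int.mod_eq_zero_iff_dvd] using hdvd)]
    simp only [hdvd, true_and]
    split_ifs with h1 h2 h2
    · rw [cond9_iff x (by omega)] at h1
      rw [cond9_iff (d / x) (Int.ediv_nonneg hd (by omega))] at h2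
      simp only [List.mem_append, List.mem_singleton]
      constructor
      · rintro (rfl | rfl)
        · exact ⟨Or.inl rfl, h1.1, h1.2⟩
        · exact ⟨Or.inr rfl, h2.1, h2.2⟩
      · rintro ⟨rfl | rfl, _, _⟩
        · exact Or.inl rfl
        · exact Or.inr rfl
    · rw [cond9_iff x (by omega)] at h1
      rw [cond9_iff (d / x) (Int.ediv_nonneg hd (by omega))] at h2
      simp only [List.append_nil, List.mem_singleton]
      constructor
      · rintro rfl; exact ⟨Or.inl rfl, h1.1, h1.2⟩
      · rintro ⟨rfl | rfl, h9, hne⟩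
        · rfl
        · exact absurd ⟨h9, hne⟩ h2
    · rw [cond9_iff x (by omega)] at h1
      rw [cond9_iff (d / x) (Int.ediv_nonneg hd (by omega))] at h2
      simp only [List.nil_append, List.mem_singleton]
      constructor
      · rintro rfl; exact ⟨Or.inr rfl, h2.1, h2.2⟩
      · rintro ⟨rfl | rfl, h9, hne⟩
        · exact absurd ⟨h9, hne⟩ h1
        · rfl
    · rw [cond9_iff x (by omega)] at h1
      rw [cond9_iff (d / x) (Int.ediv_nonneg hd (by omega))] at h2
      simp only [List.append_nil, List.not_mem_nil, false_iff]
      rintro ⟨rfl | rfl, h9, hne⟩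
      · exact absurd ⟨h9, hne⟩ h1
      · exact absurd ⟨h9, hne⟩ h2
  · rw [if_neg (by simpa [PySem.Int.mod_eq_zero_iff_dvd] using hdvd)]
    simp [hdvd]

theorem sqrt_bounds (d : Int) (hd : 0 ≤ d) :
    Int.sqrt d * Int.sqrt d ≤ d ∧ d < (Int.sqrt d + 1) * (Int.sqrt d + 1) := by
  have h1 := Nat.sqrt_le' d.toNat
  have h2 := Nat.lt_succ_sqrt' d.toNat
  have hdt : ((d.toNat : Nat) : Int) = d := Int.toNat_of_nonneg hd
  unfold Int.sqrt
  constructor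
  · have : ((Nat.sqrt d.toNat ^ 2 : Nat) : Int) ≤ ((d.toNat : Nat) : Int) := by exact_mod_cast h1
    push_cast at this
    nlinarith [this, hdt]
  · have : ((d.toNat : Nat) : Int) < (((Nat.sqrt d.toNat).succ ^ 2 : Nat) : Int) := by exact_mod_cast h2
    push_cast at this
    nlinarith [this, hdt]

-- membership in A's collected list, for 0 ≤ d
theorem mem_aside (d m : Int) (hd : 0 ≤ d) :
    m ∈ (PySem.List.pyRange 2 (Int.sqrt d + 1) 1).flatMap (aContrib d) ↔
      (m ∣ d ∧ 19 ≤ m ∧ m ≤ d / 2 ∧ m % 10 = 9) := by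
  obtain ⟨hss, hlt⟩ := sqrt_bounds d hd
  have hs0 : 0 ≤ Int.sqrt d := Int.sqrt_nonneg d
  rw [List.mem_flatMap]
  constructor
  · rintro ⟨x, hxmem, hm⟩
    obtain ⟨hx2, hxs, -⟩ :=
      (PySem.List.mem_pyRange_iff_of_pos (by norm_num : (0:Int) < 1) x).mp hxmem
    obtain ⟨hdvd, hcase, h9, hne9⟩ := (mem_aContrib d x m hd hx2).mp hm
    rcases hcase with rfl | rfl
    · refine ⟨hdvd, by omega, ?_, h9⟩
      have : 2 * m ≤ d := by nlinarith
      omega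
    · obtain ⟨c, rfl⟩ := hdvd
      have hc : x * c / x = c := Int.mul_ediv_cancel_left c (by omega)
      rw [hc] at h9 hne9 ⊢
      have hc0 : 0 ≤ c := by nlinarith
      refine ⟨Dvd.intro_left x rfl, by omega, ?_, h9⟩
      have : 2 * c ≤ x * c := by nlinarith
      omega
  · rintro ⟨hdvd, h19, hle, h9⟩
    have hd2 : 2 * m ≤ d := by omega
    obtain ⟨c, hc⟩ := hdvd
    have hc2 : 2 ≤ c := by nlinarith
    by_cases hms : m ≤ Int.sqrt d
    · refine ⟨m, ?_, ?_⟩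
      · exact (PySem.List.mem_pyRange_iff_of_pos (by norm_num) m).mpr ⟨by omega, by omega, ⟨m - 2, by ring⟩⟩
      · exact (mem_aContrib d m m hd (by omega)).mpr ⟨⟨c, hc⟩, Or.inl rfl, h9, by omega⟩
    · have hcs : c ≤ Int.sqrt d := by nlinarith
      refine ⟨c, ?_, ?_⟩
      · exact (PySem.List.mem_pyRange_iff_of_pos (by norm_num) c).mpr ⟨hc2, by omega, ⟨c - 2, by ring⟩⟩
      · refine (mem_aContrib d c m hd hc2).mpr ⟨⟨m, by linarith [hc]; ⟩, Or.inr ?_, h9, by omega⟩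
        rw [hc, mul_comm, Int.mul_ediv_cancel_left m (by omega)]

-- membership in B's list, for 0 ≤ d
theorem mem_bside (d m : Int) (_hd : 0 ≤ d) :
    m ∈ dels_alt d ↔ (m ∣ d ∧ 19 ≤ m ∧ m ≤ d / 2 ∧ m % 10 = 9) := by
  unfold dels_alt
  rw [List.mem_filter, PySem.Int.floordiv_eq_ediv_of_pos (by norm_num : (0:Int) < 2),
    PySem.List.mem_pyRange_iff_of_pos (by norm_num : (0:Int) < 10)]
  simp only [beq_iff_eq, PySem.Int.mod_eq_zero_iff_dvd]
  constructor
  · rintro ⟨⟨h1, h2, h3⟩, h4⟩; exact ⟨h4, h1, by omega, by omega⟩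
  · rintro ⟨h1, h2, h3, h4⟩; exact ⟨⟨h2, by omega, by omega⟩, h1⟩

theorem pairwise_bside (d : Int) : (dels_alt d).Pairwise (· < ·) := by
  unfold dels_alt
  refine List.Pairwise.filter _ ?_
  rw [PySem.List.pyRange_of_pos _ _ (by norm_num : (0:Int) < 10)]
  rw [List.pairwise_map]
  exact List.pairwise_lt_range.imp (by intro a b h; omega)

-- ===== VERDICT (by name: the statement is the Claim_ definition above) =====
theorem dels_spec : Claim_equal_dels := by
  intro d _ hd
  unfold Spec_dels dels
  simp only [dels_foldl_eq, List.nil_append]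
  refine PySem.List.sorted_eq_of_perm_of_pairwise_lt _ _ _ ?_ (pairwise_bside d)
  refine (List.perm_ext_iff_of_nodup ((pairwise_bside d).imp ne_of_lt) (PySem.Set.nodup_ofList _)).mpr ?_
  intro a
  rw [PySem.Set.mem_ofList, mem_aside d a hd, mem_bside d a hd]
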